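-- pv_equiv track=rewrite | github.com/ronakdinesh/ADDED_policy_simulation_september | a_preprocessing.py | is_valid_table
-- ===== SOURCE A (Python) =====
-- def is_valid_table(markdown_table):
--     """
--     Check if a markdown table is valid (at least 2x2)
--
--     Args:
--         markdown_table: Table in markdown format
--
--     Returns:
--         Boolean indicating if the table is valid
--     """
--     if not markdown_table:
--         return False
--
--     lines = markdown_table.strip().split('\n')
--
--     # Need at least 3 lines (header, separator, and at least one data row)
--     if len(lines) < 3:
--         return False
--
--     # Check if each line has at least 3 pipe characters (2 columns)
--     for line in lines:
--         if line.count('|') < 3:  # Need at least 2 columns (3 pipe chars)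
--             return False
--
--     # Additional check: Count actual data cells (not just pipe characters)
--     # This helps catch cases where there might be pipes but not actual data
--     data_rows = [line for line in lines if not line.strip().startswith('|--')]
--     if len(data_rows) < 2:  # Need at least 2 data rows
--         return False
--
--     # Check that we have actual content in multiple cells
--     non_empty_cells = 0
--     for row in data_rows:
--         cells = [cell.strip() for cell in row.split('|')[1:-1]]  # Remove empty elements from start/end
--         non_empty_cells += sum(1 for cell in cells if cell)
--
--     # Need at least 4 non-empty cells for a meaningful 2x2 table
--     # or at least 3 cells with content if it's a table with headers
--     return non_empty_cells >= 3
-- ===== SOURCE B (Python) =====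
-- def is_valid_table(markdown_table):
--     if not markdown_table:
--         return False
--     lines = markdown_table.strip().split('\n')
--     if len(lines) < 3:
--         return False
--     rows = 0
--     total_cells = 0
--     for line in lines:
--         # character state machine: no per-line string-method passes
--         pipes = 0
--         filled = False
--         cells = 0
--         sep = 0  # 0: in leading whitespace, 1: saw '|', 2: saw '|-', 3: saw '|--', -1: not a separator
--         for ch in line:
--             if ch == '|':
--                 if pipes > 0 and filled:
--                     cells += 1
--                 filled = False
--                 pipes += 1
--                 sep = 1 if sep == 0 else (-1 if sep in (1, 2) else sep)
--             elif ch.isspace():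
--                 if sep in (1, 2):
--                     sep = -1
--             else:
--                 if pipes > 0:
--                     filled = True
--                 if sep == 0:
--                     sep = -1
--                 elif sep == 1:
--                     sep = 2 if ch == '-' else -1
--                 elif sep == 2:
--                     sep = 3 if ch == '-' else -1
--         if pipes < 3:
--             return False
--         if sep != 3:
--             rows += 1
--             total_cells += cells
--     return rows >= 2 and total_cells >= 3
-- ===== Notes on version B (the rewrite author's own statement) =====
-- stated objective: alternative
-- what changed: Replaces A's per-line string-method passes (count, strip().startswith, split with slicing and per-cell strip) and its three separate scans of the line list with a single pass in which each line is read once, character by character, by a small state machine tracking the pipe count, a separator-recognition state and the number of non-empty inner cells.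
import Mathlib
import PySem

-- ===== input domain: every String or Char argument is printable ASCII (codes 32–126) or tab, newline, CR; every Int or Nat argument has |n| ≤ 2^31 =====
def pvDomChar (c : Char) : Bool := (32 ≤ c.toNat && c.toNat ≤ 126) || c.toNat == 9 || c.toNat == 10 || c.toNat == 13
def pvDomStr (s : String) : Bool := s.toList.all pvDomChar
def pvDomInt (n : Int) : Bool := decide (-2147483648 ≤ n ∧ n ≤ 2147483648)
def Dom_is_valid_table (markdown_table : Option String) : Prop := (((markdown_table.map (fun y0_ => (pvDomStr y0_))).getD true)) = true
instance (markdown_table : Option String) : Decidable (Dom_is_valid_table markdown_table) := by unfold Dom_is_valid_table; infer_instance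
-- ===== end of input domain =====

-- B replaces A's per-line string-method passes (count/strip/startswith/split) with a
-- hand-rolled character state machine scanning each line once (objective: alternative).

-- ===== PORT A =====
def is_valid_table (markdown_table : Option String) : Bool :=
  match markdown_table with
  | none => false
  | some s =>
    if s == "" then false
    else
      let lines := ((PySem.Str.split? (PySem.Str.strip s) "\n").getD [])
      if lines.length < 3 then false
      else if lines.any (fun line => PySem.Str.count line "|" < 3) then false
      else
        let data_rows := lines.filter (fun line => !(PySem.Str.startswith (PySem.Str.strip line) "|--"))
        if data_rows.length < 2 then false
        else
          let non_empty_cells := data_rows.foldl (fun acc row =>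
            let cells := (PySem.List.slice (((PySem.Str.split? row "|").getD [])) (some 1) (some (-1))).map PySem.Str.strip
            acc + (cells.filter (fun cell => cell ≠ "")).length) 0
          decide (non_empty_cells ≥ 3)

-- ===== PORT B =====
-- per-character step of Source B's inner loop; state = (pipes, filled, cells, sep)
def pvScanStep (st : Nat × Bool × Nat × Int) (ch : Char) : Nat × Bool × Nat × Int :=
  if ch = '|' then
    (st.1 + 1, false,
     if 0 < st.1 ∧ st.2.1 = true then st.2.2.1 + 1 else st.2.2.1,
     if st.2.2.2 = 0 then 1 else if st.2.2.2 = 1 ∨ st.2.2.2 = 2 then -1 else st.2.2.2)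
  else if PySem.Chars.isspace ch then
    (st.1, st.2.1, st.2.2.1, if st.2.2.2 = 1 ∨ st.2.2.2 = 2 then -1 else st.2.2.2)
  else
    (st.1, decide (0 < st.1) || st.2.1, st.2.2.1,
     if st.2.2.2 = 0 then -1
     else if st.2.2.2 = 1 then (if ch = '-' then 2 else -1)
     else if st.2.2.2 = 2 then (if ch = '-' then 3 else -1)
     else st.2.2.2)

def pvScanLine (l : List Char) : Nat × Bool × Nat × Int :=
  l.foldl pvScanStep (0, false, 0, 0)

-- Source B's outer 'for line in lines' loop with its early return, as a recursion
def pvAltCheck : List String → Nat → Nat → Bool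
  | [], rows, cells => decide (rows ≥ 2) && decide (cells ≥ 3)
  | line :: rest, rows, cells =>
    let st := pvScanLine line.toList
    if st.1 < 3 then false
    else if st.2.2.2 = 3 then pvAltCheck rest rows cells
    else pvAltCheck rest (rows + 1) (cells + st.2.2.1)

def is_valid_table_alt (markdown_table : Option String) : Bool :=
  match markdown_table with
  | none => false
  | some s =>
    if s == "" then false
    else
      let lines := ((PySem.Str.split? (PySem.Str.strip s) "\n").getD [])
      if lines.length < 3 then false
      else pvAltCheck lines 0 0

-- ===== PRECONDITION & SPEC =====
def Spec_is_valid_table (markdown_table : Option String) (out : Bool) : Prop := out = is_valid_table_alt markdown_table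
instance (markdown_table : Option String) (out : Bool) : Decidable (Spec_is_valid_table markdown_table out) := by unfold Spec_is_valid_table; infer_instance

-- ===== CLAIM (what is proved, stated in full; the proofs are below) =====
def Claim_equal_is_valid_table : Prop := ∀ (markdown_table : Option String), Dom_is_valid_table markdown_table → Spec_is_valid_table markdown_table (is_valid_table markdown_table)

-- ===== LEMMAS AND PROOFS =====

-- A's per-row non-empty-cell count (the body of A's foldl), named for the proofs
def cellCount (line : String) : Nat :=
  (((PySem.List.slice (((PySem.Str.split? line "|").getD [])) (some 1) (some (-1))).map PySem.Str.strip).filter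
    (fun cell => cell ≠ "")).length

-- ---- pipes component = line.count('|') ----

lemma countGo_char (l : List Char) : ∀ (fuel acc : Nat), l.length ≤ fuel →
    PySem.Chars.count.go ['|'] fuel l acc = acc + l.count '|' := by
  induction l with
  | nil => intro fuel acc _; cases fuel <;> simp [PySem.Chars.count.go]
  | cons c t ih =>
    intro fuel acc h
    cases fuel with
    | zero => simp at h
    | succ f =>
      rw [PySem.Chars.count.go.eq_def]
      simp only [List.length_cons, Nat.add_le_add_iff_right] at h
      by_cases hc : c = '|'
      · subst hc
        have hp : List.isPrefixOf ['|'] ('|' :: t) = true := by simp [List.isPrefixOf]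
        simp only [hp, if_pos, List.length_singleton, List.drop_succ_cons, List.drop_zero]
        rw [ih f (acc + 1) h]
        simp [List.count_cons]; omega
      · have hp : List.isPrefixOf ['|'] (c :: t) = false := by simp [List.isPrefixOf]; exact fun h => absurd h.symm hc
        simp only [hp, Bool.false_eq_true, if_false]
        rw [ih f acc h]
        simp [List.count_cons, hc]

lemma count_pipe (l : List Char) : PySem.Chars.count l ['|'] = l.count '|' := by
  simpa [PySem.Chars.count] using countGo_char l l.length 0 le_rfl

lemma scan_pipes (l : List Char) : ∀ (p : Nat) (f : Bool) (c : Nat) (s : Int),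
    (l.foldl pvScanStep (p, f, c, s)).1 = p + l.count '|' := by
  induction l with
  | nil => intro p f c s; simp
  | cons ch t ih =>
    intro p f c s
    simp only [List.foldl_cons, List.count_cons]
    by_cases hc : ch = '|'
    · subst hc; simp [pvScanStep, ih]; omega
    · by_cases hs : PySem.Chars.isspace ch = true <;>
        simp [pvScanStep, hc, hs, ih, hc]

-- ---- sep component = stripped line starts with "|--" ----

def sepStep (s : Int) (ch : Char) : Int :=
  if ch = '|' then (if s = 0 then 1 else if s = 1 ∨ s = 2 then -1 else s)
  else if PySem.Chars.isspace ch then (if s = 1 ∨ s = 2 then -1 else s)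
  else if s = 0 then -1
  else if s = 1 then (if ch = '-' then 2 else -1)
  else if s = 2 then (if ch = '-' then 3 else -1)
  else s

lemma scan_sep (l : List Char) : ∀ (p : Nat) (f : Bool) (c : Nat) (s : Int),
    (l.foldl pvScanStep (p, f, c, s)).2.2.2 = l.foldl sepStep s := by
  induction l with
  | nil => intro p f c s; simp
  | cons ch t ih =>
    intro p f c s
    simp only [List.foldl_cons]
    by_cases hc : ch = '|'
    · subst hc; simp [pvScanStep, sepStep, ih]
    · by_cases hs : PySem.Chars.isspace ch = true <;>
        simp [pvScanStep, sepStep, hc, hs, ih]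

lemma sep_abs (l : List Char) (s : Int) (h : s = 3 ∨ s = -1) : l.foldl sepStep s = s := by
  induction l with
  | nil => rfl
  | cons ch t ih =>
    rcases h with h | h <;> subst h <;>
      simp only [List.foldl_cons, sepStep] <;> norm_num <;>
      · first | (split_ifs <;> simp_all [ih]) | exact ih

lemma sep_two (l : List Char) : l.foldl sepStep 2 = 3 ↔ ∃ t, l = '-' :: t := by
  cases l with
  | nil => simp [List.foldl]
  | cons ch t =>
    by_cases hc : ch = '-'
    · subst hc
      simp only [List.foldl_cons]
      have : sepStep 2 '-' = 3 := by decide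
      rw [this, sep_abs t 3 (Or.inl rfl)]
      simp
    · have h3 : sepStep 2 ch = -1 := by
        by_cases hp : ch = '|'
        · subst hp; decide
        · by_cases hs : PySem.Chars.isspace ch = true <;> simp [sepStep, hp, hs, hc]
      simp only [List.foldl_cons, h3, sep_abs t (-1) (Or.inr rfl)]
      constructor
      · intro h; omega
      · rintro ⟨t', ht⟩
        injection ht with h1 h2
        exact absurd h1 hc

lemma sep_one (l : List Char) : l.foldl sepStep 1 = 3 ↔ ∃ t, l = '-' :: '-' :: t := by
  cases l with
  | nil => simp [List.foldl]
  | cons ch t =>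
    by_cases hc : ch = '-'
    · subst hc
      simp only [List.foldl_cons]
      have h2 : sepStep 1 '-' = 2 := by decide
      rw [h2, sep_two t]
      constructor
      · rintro ⟨t', rfl⟩; exact ⟨t', rfl⟩
      · rintro ⟨t', ht⟩; injection ht with _ h2'; exact ⟨t', h2'⟩
    · have h3 : sepStep 1 ch = -1 := by
        by_cases hp : ch = '|'
        · subst hp; decide
        · by_cases hs : PySem.Chars.isspace ch = true <;> simp [sepStep, hp, hs, hc]
      simp only [List.foldl_cons, h3, sep_abs t (-1) (Or.inr rfl)]
      constructor
      · intro h; omega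
      · rintro ⟨t', ht⟩; injection ht with h1 _; exact absurd h1 hc

lemma sep_zero (l : List Char) :
    l.foldl sepStep 0 = 3 ↔ ∃ t, l.dropWhile PySem.Chars.isspace = '|' :: '-' :: '-' :: t := by
  induction l with
  | nil => simp [List.foldl]
  | cons ch t ih =>
    by_cases hp : ch = '|'
    · subst hp
      have h1 : sepStep 0 '|' = 1 := by decide
      have hws : PySem.Chars.isspace '|' = false := by decide
      simp only [List.foldl_cons, h1, List.dropWhile_cons, hws, Bool.false_eq_true, if_false,
        sep_one t]
      constructor
      · rintro ⟨t', rfl⟩; exact ⟨t', rfl⟩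
      · rintro ⟨t', ht⟩; injection ht with _ h2'; exact ⟨t', h2'⟩
    · by_cases hs : PySem.Chars.isspace ch = true
      · have h0 : sepStep 0 ch = 0 := by simp [sepStep, hp, hs]
        simp only [List.foldl_cons, h0, List.dropWhile_cons, hs, if_pos, ih]
      · have hm : sepStep 0 ch = -1 := by simp [sepStep, hp, hs]
        simp only [List.foldl_cons, hm, sep_abs t (-1) (Or.inr rfl), List.dropWhile_cons, hs,
          Bool.false_eq_true, if_false]
        constructor
        · intro h; omega
        · rintro ⟨t', ht⟩; injection ht with h1 _; exact absurd h1 hp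

lemma strip_startswith (l : List Char) :
    (PySem.Chars.startswith (PySem.Chars.strip l) ['|', '-', '-'] = true) ↔
      ∃ t, l.dropWhile PySem.Chars.isspace = '|' :: '-' :: '-' :: t := by
  rw [PySem.Chars.startswith_iff]
  unfold PySem.Chars.strip PySem.Chars.lstrip
  set x := l.dropWhile PySem.Chars.isspace with hx
  constructor
  · intro h
    have hsub : PySem.Chars.rstrip x <+: x := by
      unfold PySem.Chars.rstrip
      conv_rhs => rw [← List.reverse_reverse x]
      exact List.reverse_prefix.mpr (List.dropWhile_suffix _)
    obtain ⟨t, ht⟩ := h.trans hsub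
    exact ⟨t, by simpa using ht.symm⟩
  · rintro ⟨t, ht⟩
    unfold PySem.Chars.rstrip
    rw [ht]
    have : ('|' :: '-' :: '-' :: t).reverse = t.reverse ++ ['-', '-', '|'] := by simp
    rw [this, List.dropWhile_append]
    by_cases he : (List.dropWhile PySem.Chars.isspace t.reverse).isEmpty = true
    · simp only [he, if_pos]
      have : List.dropWhile PySem.Chars.isspace ['-', '-', '|'] = ['-', '-', '|'] := by decide
      rw [this]
      simp
    · simp only [he, Bool.false_eq_true, if_false]
      rw [List.reverse_append]
      exact ⟨(List.dropWhile PySem.Chars.isspace t.reverse).reverse, by simp⟩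

-- ---- cells component = A's per-row cell count ----

def pysplit : List Char → List (List Char)
  | [] => [[]]
  | c :: t => if c = '|' then [] :: pysplit t else (pysplit t).modifyHead (c :: ·)

lemma pysplit_ne_nil (l : List Char) : pysplit l ≠ [] := by
  induction l with
  | nil => simp [pysplit]
  | cons c t ih =>
    simp only [pysplit]
    split_ifs
    · simp
    · cases h : pysplit t with
      | nil => exact absurd h ih
      | cons a b => simp

lemma splitOnGo_char (l : List Char) : ∀ (fuel : Nat) (cur : List Char) (acc : List (List Char)),
    l.length ≤ fuel →
    PySem.Chars.splitOn.go ['|'] fuel l cur acc =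
      acc.reverse ++ (pysplit l).modifyHead (cur.reverse ++ ·) := by
  induction l with
  | nil =>
    intro fuel cur acc _
    cases fuel <;> simp [PySem.Chars.splitOn.go, pysplit]
  | cons c t ih =>
    intro fuel cur acc h
    cases fuel with
    | zero => simp at h
    | succ f =>
      rw [PySem.Chars.splitOn.go.eq_def]
      simp only [List.length_cons, Nat.add_le_add_iff_right] at h
      by_cases hc : c = '|'
      · subst hc
        have hp : List.isPrefixOf ['|'] ('|' :: t) = true := by simp [List.isPrefixOf]
        simp only [hp, if_pos, List.length_singleton, List.drop_succ_cons, List.drop_zero]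
        rw [ih f [] (cur.reverse :: acc) h]
        simp [pysplit]
        cases hps : pysplit t with
        | nil => exact absurd hps (pysplit_ne_nil t)
        | cons a b => simp
      · have hp : List.isPrefixOf ['|'] (c :: t) = false := by
          simp [List.isPrefixOf]; exact fun h => absurd h.symm hc
        simp only [hp, Bool.false_eq_true, if_false]
        rw [ih f (c :: cur) acc h]
        simp only [pysplit, hc, if_neg, List.reverse_cons]
        cases hps : pysplit t with
        | nil => exact absurd hps (pysplit_ne_nil t)
        | cons a b => simp [hps]

lemma splitOn_char (l : List Char) : PySem.Chars.splitOn l ['|'] = pysplit l := by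
  unfold PySem.Chars.splitOn
  rw [splitOnGo_char l (l.length + 1) [] [] (by omega)]
  cases hps : pysplit l with
  | nil => exact absurd hps (pysplit_ne_nil l)
  | cons a b => simp

lemma pysplit_length (l : List Char) : (pysplit l).length = l.count '|' + 1 := by
  induction l with
  | nil => simp [pysplit]
  | cons c t ih =>
    simp only [pysplit, List.count_cons]
    by_cases hc : c = '|'
    · subst hc; simp [ih]
    · simp [hc, ih]

lemma pysplit_head (l : List Char) : ∃ xs, pysplit l = l.takeWhile (· ≠ '|') :: xs := by
  induction l with
  | nil => exact ⟨[], rfl⟩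
  | cons c t ih =>
    by_cases hc : c = '|'
    · subst hc; exact ⟨pysplit t, by simp [pysplit, List.takeWhile_cons]⟩
    · obtain ⟨xs, hxs⟩ := ih
      refine ⟨xs, ?_⟩
      simp [pysplit, hc, hxs, List.takeWhile_cons, List.modifyHead]

lemma pysplit_no_pipe (l : List Char) (h : '|' ∉ l) : pysplit l = [l] := by
  induction l with
  | nil => rfl
  | cons c t ih =>
    simp only [List.mem_cons, not_or] at h
    simp [pysplit, Ne.symm h.1, ih h.2, List.modifyHead]

def gCells (f : Bool) : List Char → Nat
  | [] => 0
  | c :: t =>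
    if c = '|' then (if f then 1 else 0) + gCells false t
    else gCells (f || !PySem.Chars.isspace c) t

def cellCountC (l : List Char) : Nat :=
  (((pysplit l).drop 1).dropLast).countP (fun cell => !(cell.all PySem.Chars.isspace))

lemma gCells_eq (l : List Char) : ∀ f : Bool,
    gCells f l = ((pysplit l).dropLast).countP (fun cell => !(cell.all PySem.Chars.isspace)) +
      (if f = true ∧ '|' ∈ l ∧ (l.takeWhile (· ≠ '|')).all PySem.Chars.isspace then 1 else 0) := by
  induction l with
  | nil => intro f; simp [gCells, pysplit]
  | cons c t ih =>
    intro f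
    by_cases hc : c = '|'
    · subst hc
      simp only [gCells, if_pos, ih false]
      have hd : (pysplit ('|' :: t)).dropLast =
          [] :: (pysplit t).dropLast := by
        simp only [pysplit, if_pos]
        exact List.dropLast_cons_of_ne_nil (pysplit_ne_nil t)
      rw [hd]
      simp only [List.countP_cons]
      have : (fun cell => !(cell.all PySem.Chars.isspace)) ([] : List Char) = false := by decide
      simp only [this]
      have hmem : ('|' : Char) ∈ '|' :: t := List.mem_cons_self
      have htk : ((('|' : Char) :: t).takeWhile (· ≠ '|')).all PySem.Chars.isspace = true := by
        simp [List.takeWhile_cons]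
      simp [hmem, htk]
      cases f <;> simp <;> omega
    · simp only [gCells, hc, if_neg, ih (f || !PySem.Chars.isspace c), Bool.or_eq_true]
      by_cases hmem : ('|' : Char) ∈ t
      · -- pysplit t has length ≥ 2
        obtain ⟨xs, hxs⟩ := pysplit_head t
        have hxs_ne : xs ≠ [] := by
          have := pysplit_length t
          rw [hxs] at this
          intro h; subst h
          simp at this
          have : 0 < t.count '|' := List.count_pos_iff.mpr hmem
          omega
        have hps : pysplit (c :: t) = (c :: t.takeWhile (· ≠ '|')) :: xs := by
          simp [pysplit, hc, hxs, List.modifyHead]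
        have hd1 : (pysplit (c :: t)).dropLast = (c :: t.takeWhile (· ≠ '|')) :: xs.dropLast :=
          by rw [hps]; exact List.dropLast_cons_of_ne_nil hxs_ne
        have hd2 : (pysplit t).dropLast = t.takeWhile (· ≠ '|') :: xs.dropLast :=
          by rw [hxs]; exact List.dropLast_cons_of_ne_nil hxs_ne
        rw [hd1, hd2]
        have htk2 : List.takeWhile (fun x => decide (x ≠ '|')) (c :: t) =
            c :: List.takeWhile (fun x => decide (x ≠ '|')) t := by
          simp [List.takeWhile_cons, hc]
        rw [htk2]
        simp only [List.countP_cons, List.all_cons]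
        rcases Bool.dichotomy ((t.takeWhile (· ≠ '|')).all PySem.Chars.isspace) with hA | hA <;>
          rcases Bool.dichotomy (PySem.Chars.isspace c) with hw | hw <;> cases f <;>
          · simp only [hA, hw, hmem, List.mem_cons, Bool.not_true, Bool.not_false,
              Bool.or_false, Bool.or_true, Bool.and_true, Bool.and_false, Bool.true_and,
              Bool.false_and, if_false, if_true, and_true, true_and, and_false, false_and,
              Bool.false_eq_true, Bool.true_eq_false, if_pos, if_neg, not_false_iff,
              or_true, true_or, or_false, false_or, or_self]
            try omega
      · have hnp : ('|' : Char) ∉ c :: t := by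
          simp only [List.mem_cons, not_or]
          exact ⟨fun h => hc h.symm, hmem⟩
        rw [pysplit_no_pipe t hmem, pysplit_no_pipe (c :: t) hnp]
        simp [hmem, hnp]

lemma scan_cells_pos (l : List Char) : ∀ (p : Nat) (f : Bool) (c : Nat) (s : Int), 1 ≤ p →
    (l.foldl pvScanStep (p, f, c, s)).2.2.1 = c + gCells f l := by
  induction l with
  | nil => intro p f c s _; simp [gCells]
  | cons ch t ih =>
    intro p f c s hp
    simp only [List.foldl_cons]
    by_cases hc : ch = '|'
    · subst hc
      simp only [pvScanStep, if_pos]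
      rw [ih (p + 1) false _ _ (by omega)]
      simp only [gCells, if_pos]
      have hcond : (if 0 < p ∧ f = true then c + 1 else c) = c + (if f then 1 else 0) := by
        cases f <;> simp [show 0 < p by omega]
      rw [hcond, Nat.add_assoc]
    · by_cases hs : PySem.Chars.isspace ch = true
      · simp only [pvScanStep, hc, if_neg, hs, if_pos, not_false_iff]
        rw [ih p f c _ hp]
        simp [gCells, hc, hs]
      · simp only [pvScanStep, hc, hs, if_neg, not_false_iff, Bool.false_eq_true]
        rw [ih p _ c _ hp]
        have hd : decide (0 < p) = true := by simp; omega
        simp [gCells, hc, hs, hd]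

lemma scan_cells_zero (l : List Char) : ∀ (s : Int),
    (l.foldl pvScanStep (0, false, 0, s)).2.2.1 = cellCountC l := by
  induction l with
  | nil => intro s; simp [cellCountC, pysplit]
  | cons c t ih =>
    intro s
    simp only [List.foldl_cons]
    by_cases hc : c = '|'
    · subst hc
      simp only [pvScanStep, if_pos]
      norm_num
      rw [scan_cells_pos t 1 false 0 _ le_rfl]
      rw [gCells_eq t false]
      simp only [Bool.false_eq_true, false_and, if_false, Nat.add_zero, Nat.zero_add]
      simp only [cellCountC, pysplit, if_pos, List.drop_succ_cons, List.drop_zero]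
    · by_cases hs : PySem.Chars.isspace c = true
      · simp only [pvScanStep, hc, hs, if_neg, if_pos, not_false_iff]
        rw [ih _]
        simp only [cellCountC, pysplit, hc, if_neg, not_false_iff]
        congr 1
        cases hps : pysplit t with
        | nil => exact absurd hps (pysplit_ne_nil t)
        | cons a b => simp [List.modifyHead]
      · simp only [pvScanStep, hc, hs, if_neg, not_false_iff, Bool.false_eq_true]
        norm_num
        rw [ih _]
        simp only [cellCountC, pysplit, hc, if_neg, not_false_iff]
        congr 1
        cases hps : pysplit t with
        | nil => exact absurd hps (pysplit_ne_nil t)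
        | cons a b => simp [List.modifyHead]

lemma scan_cells (l : List Char) : (pvScanLine l).2.2.1 = cellCountC l :=
  scan_cells_zero l 0

lemma strip_eq_nil_iff (l : List Char) :
    (PySem.Chars.strip l = []) ↔ l.all PySem.Chars.isspace = true := by
  unfold PySem.Chars.strip PySem.Chars.rstrip PySem.Chars.lstrip
  rw [List.reverse_eq_nil_iff, List.dropWhile_eq_nil_iff]
  simp only [List.mem_reverse, List.all_eq_true]
  constructor
  · intro h x hx
    by_cases hxw : x ∈ List.dropWhile PySem.Chars.isspace l
    · exact h x hxw
    · have h1 := List.takeWhile_append_dropWhile (p := PySem.Chars.isspace) (l := l)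
      rw [← h1] at hx
      rcases List.mem_append.mp hx with h2 | h2
      · exact List.mem_takeWhile_imp h2
      · exact absurd h2 hxw
  · intro h x hx
    exact h x ((List.dropWhile_sublist _).subset hx)

lemma slice_mid {α : Type} (xs : List α) :
    PySem.List.slice xs (some 1) (some (-1)) = xs.tail.dropLast := by
  simp [PySem.List.slice]
  cases xs with
  | nil => simp
  | cons a t => simp [List.dropLast_eq_take]

lemma cellCount_eq (row : String) : cellCount row = cellCountC row.toList := by
  unfold cellCount cellCountC
  have hsplit : (PySem.Str.split? row "|").getD [] = (pysplit row.toList).map String.ofList := by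
    unfold PySem.Str.split? PySem.Chars.split?
    have : ("|" : String).toList = ['|'] := rfl
    rw [this]
    simp [splitOn_char]
  rw [hsplit, slice_mid, ← List.map_tail, ← List.map_dropLast, List.map_map]
  rw [← List.countP_eq_length_filter, List.countP_map, List.drop_one]
  apply List.countP_congr
  intro cs _
  have hstrip : PySem.Str.strip (String.ofList cs) = String.ofList (PySem.Chars.strip cs) := by
    unfold PySem.Str.strip
    rw [String.toList_ofList]
  by_cases hall : cs.all PySem.Chars.isspace = true
  · have h0 : PySem.Chars.strip cs = [] := (strip_eq_nil_iff cs).mpr hall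
    simp only [Function.comp_apply, hstrip, h0, hall]
    decide
  · have h0 : PySem.Chars.strip cs ≠ [] := fun h => hall ((strip_eq_nil_iff cs).mp h)
    have hne : String.ofList (PySem.Chars.strip cs) ≠ "" := fun heq =>
      h0 (by simpa using congrArg String.toList heq)
    simp only [Function.comp_apply, hstrip, hall]
    simp [hne]

-- ---- assembled per-line facts, at String level ----

lemma line_pipes (line : String) : (pvScanLine line.toList).1 = PySem.Str.count line "|" := by
  rw [PySem.Str.count_eq]
  have : ("|" : String).toList = ['|'] := rfl
  rw [this, count_pipe]
  simpa using scan_pipes line.toList 0 false 0 0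

lemma line_sep (line : String) :
    ((pvScanLine line.toList).2.2.2 = 3) ↔
      PySem.Str.startswith (PySem.Str.strip line) "|--" = true := by
  unfold pvScanLine
  rw [scan_sep line.toList 0 false 0 0, sep_zero]
  have h1 : PySem.Str.startswith (PySem.Str.strip line) "|--" =
      PySem.Chars.startswith (PySem.Chars.strip line.toList) ['|', '-', '-'] := by
    rw [PySem.Str.startswith_eq, PySem.Str.toList_strip]
    rfl
  rw [h1, strip_startswith]

-- ---- B's loop characterised by A's primitives ----

set_option maxHeartbeats 1000000 in
lemma altCheck_char (ls : List String) : ∀ (rows cells : Nat),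
    pvAltCheck ls rows cells =
      if ls.any (fun line => PySem.Str.count line "|" < 3) then false
      else
        let d := ls.filter (fun line => !(PySem.Str.startswith (PySem.Str.strip line) "|--"))
        decide (rows + d.length ≥ 2) && decide (cells + (d.map cellCount).sum ≥ 3) := by
  induction ls with
  | nil => intro rows cells; simp [pvAltCheck]
  | cons line rest ih =>
    intro rows cells
    have hpipe : ((pvScanLine line.toList).1 < 3) ↔ (PySem.Str.count line "|" < 3) := by
      rw [line_pipes]
    have hcountEq : PySem.Str.count line "|" = PySem.Chars.count line.toList ['|'] :=
      PySem.Str.count_eq line "|"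
    by_cases hp : PySem.Str.count line "|" < 3
    · have h1 : pvAltCheck (line :: rest) rows cells = false := by
        simp [pvAltCheck, hpipe.mpr hp]
      rw [h1]
      have hpc : PySem.Chars.count line.toList ['|'] < 3 := by rw [← hcountEq]; exact hp
      simp [List.any_cons, hpc]
    · have hp2 : ¬ (pvScanLine line.toList).1 < 3 := fun h => hp (hpipe.mp h)
      by_cases hsep : (pvScanLine line.toList).2.2.2 = 3
      · have hsep' := (line_sep line).mp hsep
        have h1 : pvAltCheck (line :: rest) rows cells = pvAltCheck rest rows cells := by
          simp [pvAltCheck, hp2, hsep]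
        rw [h1, ih rows cells]
        have hpc : ¬ PySem.Chars.count line.toList ['|'] < 3 := by rw [← hcountEq]; exact hp
        have hsepC : PySem.Chars.startswith (PySem.Chars.strip line.toList) ['|', '-', '-'] = true := by
          simpa using hsep'
        simp [List.any_cons, List.filter_cons, hpc, hsepC]
      · have hsep' : PySem.Str.startswith (PySem.Str.strip line) "|--" = false := by
          rcases Bool.dichotomy (PySem.Str.startswith (PySem.Str.strip line) "|--") with h | h
          · exact h
          · exact absurd ((line_sep line).mpr h) hsep
        have hcells : (pvScanLine line.toList).2.2.1 = cellCount line := by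
          rw [scan_cells, cellCount_eq]
        have h1 : pvAltCheck (line :: rest) rows cells =
            pvAltCheck rest (rows + 1) (cells + cellCount line) := by
          simp [pvAltCheck, hp2, hsep, hcells]
        rw [h1, ih (rows + 1) (cells + cellCount line)]
        have hc : decide (PySem.Str.count line "|" < 3) = false := decide_eq_false hp
        have hpc : ¬ PySem.Chars.count line.toList ['|'] < 3 := by rw [← hcountEq]; exact hp
        have hsepC : PySem.Chars.startswith (PySem.Chars.strip line.toList) ['|', '-', '-'] = false := by
          simpa using hsep'
        simp [List.any_cons, hpc, hsepC]
        congr 1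
        congr 1 <;> rw [decide_eq_decide] <;> omega
lemma foldl_add_sum (f : String → Nat) (ls : List String) (n : Nat) :
    ls.foldl (fun acc row => acc + f row) n = n + (ls.map f).sum := by
  induction ls generalizing n with
  | nil => simp
  | cons x xs ih => simp [List.foldl, ih]; omega

lemma per_row_count (row : String) :
    (List.filter (fun cell => !decide (cell = ""))
      (List.map PySem.Str.strip
        (PySem.List.slice ((PySem.Str.split? row "|").getD []) (some 1) (some (-1))))).length
      = cellCount row := by
  simp [cellCount]

lemma not_le_one_eq (n : Nat) : (!decide (n ≤ 1)) = decide (2 ≤ n) := by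
  rw [← decide_not, decide_eq_decide]; omega

-- ===== VERDICT (by name: the statement is the Claim_ definition above) =====
theorem is_valid_table_spec : Claim_equal_is_valid_table := by
  intro mt _
  unfold Spec_is_valid_table is_valid_table is_valid_table_alt
  match mt with
  | none => rfl
  | some s =>
    by_cases h0 : (s == "") = true
    · simp [h0]
    · simp only [h0, Bool.false_eq_true, if_false]
      by_cases h3 : ((PySem.Str.split? (PySem.Str.strip s) "\n").getD []).length < 3
      · simp [h3]
      · simp only [h3, if_false]
        rw [altCheck_char]
        simp [foldl_add_sum, per_row_count, not_le_one_eq]
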